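-- pv_equiv track=rewrite | github.com/mixmikmic/Unpopular_GH_analysis | python/8266_109607_problems_4.py | remove_item_from_array
-- ===== SOURCE A (Python) =====
-- def remove_item_from_array(arr, item):
--     k = 0
--     l = len(arr)
--     for idx, j in enumerate(arr):
--         if j == item:
--             k += 1
--         else:
--             arr[idx - k] = j
--
--     return arr[0:(l-k)]
-- ===== SOURCE B (Python) =====
-- def remove_item_from_array(arr, item):
--     res = [x for x in arr if x != item]
--     for i, v in enumerate(res):
--         arr[i] = v
--     return res
-- ===== Notes on version B (the rewrite author's own statement) =====
-- stated objective: simpler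
-- what changed: Replaces the index/offset bookkeeping (shift-left-in-place with a running deletion count, then slice) by a single filter comprehension, with a separate writeback loop reproducing A's in-place prefix mutation.
import Mathlib
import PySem

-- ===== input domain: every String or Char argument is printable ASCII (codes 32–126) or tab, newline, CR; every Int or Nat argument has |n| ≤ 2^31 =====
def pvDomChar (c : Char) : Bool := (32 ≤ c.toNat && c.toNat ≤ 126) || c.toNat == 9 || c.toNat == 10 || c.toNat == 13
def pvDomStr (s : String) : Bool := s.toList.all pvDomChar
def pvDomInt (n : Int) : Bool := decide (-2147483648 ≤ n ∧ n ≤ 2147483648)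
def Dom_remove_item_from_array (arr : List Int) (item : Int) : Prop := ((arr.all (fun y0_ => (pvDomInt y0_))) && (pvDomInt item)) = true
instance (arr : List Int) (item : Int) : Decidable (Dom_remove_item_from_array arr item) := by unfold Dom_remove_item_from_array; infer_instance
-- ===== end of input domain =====

-- B replaces A's in-place shift with a running deletion count by a single filter (simpler);
-- the equivalence proved is about the RETURN value only — in Python, B's writeback loop
-- reproduces A's partial in-place mutation of arr, which the pure Lean ports do not model.

-- ===== PORT A =====
-- loop body of A: 'if j == item: k += 1  else: arr[idx - k] = j'
def removeItemStep (item : Int) (s : List Int × Int) (p : Int × Int) : List Int × Int :=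
  if p.2 == item then (s.1, s.2 + 1)
  else (PySem.List.pySetD s.1 (p.1 - s.2) p.2, s.2)

def remove_item_from_array (arr : List Int) (item : Int) : List Int :=
  -- k = 0; l = len(arr); for idx, j in enumerate(arr): <removeItemStep>; return arr[0:(l-k)]
  let l : Int := arr.length
  let st := (PySem.List.enumerate arr).foldl (removeItemStep item) (arr, 0)
  PySem.List.slice st.1 (some 0) (some (l - st.2))

-- ===== PORT B =====
-- Source B: res = [x for x in arr if x != item]; (writeback loop mutates arr only); return res
def remove_item_from_array_alt (arr : List Int) (item : Int) : List Int :=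
  arr.filter (fun x => x != item)

-- ===== PRECONDITION & SPEC =====
def Spec_remove_item_from_array (arr : List Int) (item : Int) (out : List Int) : Prop := out = remove_item_from_array_alt arr item
instance (arr : List Int) (item : Int) (out : List Int) : Decidable (Spec_remove_item_from_array arr item out) := by unfold Spec_remove_item_from_array; infer_instance

-- ===== CLAIM (what is proved, stated in full; the proofs are below) =====
def Claim_equal_remove_item_from_array : Prop := ∀ (arr : List Int) (item : Int), Dom_remove_item_from_array arr item → Spec_remove_item_from_array arr item (remove_item_from_array arr item)

-- ===== LEMMAS AND PROOFS =====

-- Loop invariant for A's fold: processing `rest` over buffer `F ++ R` (F = already-compacted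
-- prefix, k deletions so far, next index F.length + k) yields the filtered list followed by a
-- stale tail D, and the final k counts all matches.
theorem removeItem_loop_inv (item : Int) :
    ∀ (rest F R : List Int) (k : Nat), rest.length ≤ R.length →
    ∃ D : List Int, D.length = R.length - (rest.filter (fun x => x != item)).length ∧
      (PySem.List.enumerate rest ((F.length + k : Nat) : Int)).foldl
        (removeItemStep item) (F ++ R, (k : Int))
      = (F ++ rest.filter (fun x => x != item) ++ D,
         (k : Int) + (rest.countP (fun x => x == item) : Int)) := by
  intro rest
  induction rest with
  | nil =>
    intro F R k _
    exact ⟨R, by simp [PySem.List.enumerate]⟩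
  | cons x t ih =>
    intro F R k hlen
    cases R with
    | nil => simp at hlen
    | cons r R' =>
      rw [PySem.List.enumerate_cons, List.foldl_cons]
      by_cases hx : x = item
      · -- x == item : skip, k increments
        have hstep : removeItemStep item (F ++ r :: R', (k : Int)) (((F.length + k : Nat) : Int), x)
            = (F ++ r :: R', (k : Int) + 1) := by
          simp [removeItemStep, hx]
        rw [hstep]
        have hcast : ((F.length + k : Nat) : Int) + 1 = ((F.length + (k + 1) : Nat) : Int) := by
          push_cast; ring
        rw [hcast]
        obtain ⟨D, hD, hfold⟩ := ih F (r :: R') (k + 1)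
          (by simp at hlen ⊢; omega)
        refine ⟨D, ?_, ?_⟩
        · simpa [hx] using hD
        · rw [show ((k : Int) + 1) = ((k + 1 : Nat) : Int) by push_cast; ring]
          rw [hfold]
          simp [hx]
          ring
      · -- x != item : write x at position F.length, compacting
        have hstep : removeItemStep item (F ++ r :: R', (k : Int)) (((F.length + k : Nat) : Int), x)
            = ((F ++ [x]) ++ R', (k : Int)) := by
          have hidx : ((F.length + k : Nat) : Int) - (k : Int) = ((F.length : Nat) : Int) := by
            push_cast; ring
          simp only [removeItemStep, beq_iff_eq, if_neg hx]
          rw [hidx, PySem.List.pySetD_natCast (F ++ r :: R') F.length x]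
          simp
        rw [hstep]
        have hcast : ((F.length + k : Nat) : Int) + 1 = (((F ++ [x]).length + k : Nat) : Int) := by
          simp; ring
        rw [hcast]
        obtain ⟨D, hD, hfold⟩ := ih (F ++ [x]) R' k (by simpa using hlen)
        refine ⟨D, ?_, ?_⟩
        · simp [hx, hD]
        · rw [hfold]
          simp [hx]

theorem remove_item_eq_filter (arr : List Int) (item : Int) :
    remove_item_from_array arr item = arr.filter (fun x => x != item) := by
  obtain ⟨D, hD, hfold⟩ := removeItem_loop_inv item arr [] arr 0 (le_refl _)
  norm_num at hfold
  unfold remove_item_from_array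
  simp only []
  rw [hfold]
  have hsl : ((arr.length : Int)) - ((arr.countP (fun x => x == item) : Nat) : Int)
      = (((arr.filter (fun x => x != item)).length : Nat) : Int) := by
    have h1 := List.length_eq_length_filter_add (l := arr) (fun x => x != item)
    have hc : (arr.filter (fun a => !(a != item))).length
        = arr.countP (fun x => x == item) := by
      simp only [List.countP_eq_length_filter]
      congr 1
      apply List.filter_congr
      intro a _
      simp [bne]
    omega
  rw [hsl, PySem.List.slice_zero_start, PySem.List.slice_to_natCast]
  exact List.take_left

-- ===== VERDICT (by name: the statement is the Claim_ definition above) =====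
theorem remove_item_from_array_spec : Claim_equal_remove_item_from_array := by
  intro arr item _
  unfold Spec_remove_item_from_array remove_item_from_array_alt
  exact remove_item_eq_filter arr item
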